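-- pv_equiv track=rewrite | github.com/Azure/Azure-Sentinel | Tools/QRadarMigration/qradar_collector.py | _intersect_lst_sets
-- ===== SOURCE A (Python) =====
-- def _intersect_lst_sets(sets):
--     # type: (list) -> set or None
--     """Intersect a list of LST constraint sets with None-as-universal semantics.
--
--     None entries represent universal (no constraint).
--     Empty set represents impossible (no matching types).
--     Empty input list returns None (no constraints = universal).
--
--     Args:
--         sets: List of set-or-None entries to intersect.
--
--     Returns:
--         set or None: Intersection result.
--     """
--     result = None
--     for s in sets:
--         if s is None:
--             continue
--         if result is None:
--             result = set(s)
--         else: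
--             result = result & s
--         if not result:
--             return set()
--     return result
-- ===== SOURCE B (Python) =====
-- def _intersect_lst_sets(sets):
--     """Intersect a list of LST constraint sets with None-as-universal semantics.
--
--     Per-element probing: pick the first non-None set as the candidate pool and
--     keep each candidate iff it is a member of every other non-None set.
--     """
--     real = [s for s in sets if s is not None]
--     if not real:
--         return None
--     first, rest = real[0], real[1:]
--     return {x for x in first if all(x in s for s in rest)}
-- ===== Notes on version B (the rewrite author's own statement) =====
-- stated objective: simpler
-- what changed: Replaces A's accumulator loop of pairwise set intersections (with early return on empty) by per-element probing: a single set comprehension over the first non-None set keeping each element iff it is a member of every other non-None set; no intersection operation and no accumulator narrowing.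
import Mathlib
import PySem

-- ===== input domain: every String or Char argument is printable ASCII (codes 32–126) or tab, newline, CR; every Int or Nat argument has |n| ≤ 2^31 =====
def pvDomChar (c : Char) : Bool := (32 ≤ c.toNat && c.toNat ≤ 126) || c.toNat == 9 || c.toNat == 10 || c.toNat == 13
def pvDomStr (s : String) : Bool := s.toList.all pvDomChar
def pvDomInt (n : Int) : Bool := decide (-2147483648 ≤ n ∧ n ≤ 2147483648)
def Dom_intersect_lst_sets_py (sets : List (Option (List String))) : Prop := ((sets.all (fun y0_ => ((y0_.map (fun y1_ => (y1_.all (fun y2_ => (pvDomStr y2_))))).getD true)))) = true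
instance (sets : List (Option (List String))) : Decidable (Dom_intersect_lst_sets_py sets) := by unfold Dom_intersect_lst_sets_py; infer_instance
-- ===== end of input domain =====

-- B replaces A's accumulator loop of pairwise intersections (with early return on empty)
-- by per-element probing: filter the first non-None set by membership in every other set (simpler decomposition).


-- ===== PORT A =====
-- A's loop: accumulator `result : Option Set`, skip None, seed with set(s) or intersect,
-- early-return set() as soon as the accumulator is empty.
def pyA_loop : Option (List String) → List (Option (List String)) → Option (List String)
  | result, [] => result
  | result, none :: rest => pyA_loop result rest
  | result, some s :: rest =>
    let r : PySem.Set String :=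
      match result with
      | none => PySem.Set.ofList s
      | some r => PySem.Set.inter r s
    if r.isEmpty then some [] else pyA_loop (some r) rest

def intersect_lst_sets_py (sets : List (Option (List String))) : Option (List String) :=
  pyA_loop none sets

-- ===== PORT B =====
-- B: filter out the None entries; no real set → None; otherwise keep each element of the
-- first set iff it is a member of every remaining set (set comprehension with all()).
def intersect_lst_sets_py_alt (sets : List (Option (List String))) : Option (List String) :=
  match sets.filterMap id with
  | [] => none
  | first :: rest =>
    some ((PySem.Set.ofList first).filter (fun x => rest.all (fun s => s.contains x)))

-- ===== PRECONDITION & SPEC =====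
def Spec_intersect_lst_sets_py (sets : List (Option (List String))) (out : Option (List String)) : Prop := out = intersect_lst_sets_py_alt sets
instance (sets : List (Option (List String))) (out : Option (List String)) : Decidable (Spec_intersect_lst_sets_py sets out) := by unfold Spec_intersect_lst_sets_py; infer_instance

-- ===== CLAIM (what is proved, stated in full; the proofs are below) =====
def Claim_equal_intersect_lst_sets_py : Prop := ∀ (sets : List (Option (List String))), Dom_intersect_lst_sets_py sets → Spec_intersect_lst_sets_py sets (intersect_lst_sets_py sets)

-- ===== LEMMAS AND PROOFS =====

-- Python's s & t keeps the elements of s (in s's order) that lie in t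
lemma set_inter_eq_filter (s t : List String) :
    PySem.Set.inter s t = s.filter (fun x => t.contains x) := by
  simp [PySem.Set.inter, PySem.Set.contains]

-- A's loop, once seeded with r, computes r filtered by membership in all remaining real sets
lemma pyA_loop_some (rest : List (Option (List String))) :
    ∀ r : List String,
      pyA_loop (some r) rest =
        some (r.filter (fun x => (rest.filterMap id).all (fun s => s.contains x))) := by
  induction rest with
  | nil => intro r; simp [pyA_loop]
  | cons o rest ih =>
    intro r
    match o with
    | none => simpa [pyA_loop] using ih r
    | some s =>
      rw [pyA_loop]
      have hi := set_inter_eq_filter r s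
      by_cases h : (PySem.Set.inter r s).isEmpty
      · rw [if_pos h]
        have hno : ∀ x ∈ r, ¬ (s.contains x = true) := by
          rw [List.isEmpty_iff, hi, List.filter_eq_nil_iff] at h
          exact h
        have hz : List.filter (fun x => (List.filterMap id (some s :: rest)).all fun t => t.contains x) r = [] := by
          rw [List.filter_eq_nil_iff]
          intro x hx hall
          have h1 : ((s :: List.filterMap id rest).all (fun t => t.contains x)) = true := hall
          rw [List.all_cons, Bool.and_eq_true] at h1
          exact hno x hx h1.1
        rw [hz]
      · rw [if_neg h, ih, hi, List.filter_filter]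
        congr 1
        apply List.filter_congr
        intro x _
        show _ = ((s :: List.filterMap id rest).all (fun t => t.contains x))
        rw [List.all_cons]
        cases hc : s.contains x <;> simp

-- top level: the first real set seeds the accumulator; B filters it by the remaining real sets
lemma pyA_eq_alt (sets : List (Option (List String))) :
    pyA_loop none sets = intersect_lst_sets_py_alt sets := by
  induction sets with
  | nil => rfl
  | cons o rest ih =>
    match o with
    | none => simpa [pyA_loop, intersect_lst_sets_py_alt] using ih
    | some s =>
      rw [pyA_loop]
      by_cases h : (PySem.Set.ofList s).isEmpty
      · rw [if_pos h]
        have he : PySem.Set.ofList s = [] := List.isEmpty_iff.mp h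
        simp [intersect_lst_sets_py_alt, he]
      · rw [if_neg h, pyA_loop_some]
        simp [intersect_lst_sets_py_alt]

-- ===== VERDICT (by name: the statement is the Claim_ definition above) =====
theorem intersect_lst_sets_py_spec : Claim_equal_intersect_lst_sets_py := by
  intro sets _
  unfold Spec_intersect_lst_sets_py intersect_lst_sets_py
  exact pyA_eq_alt sets
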